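-- pv_equiv track=rewrite | github.com/hackroid/pMOEA-D | get_neighbour.py | get_neighbour
-- ===== SOURCE A (Python) =====
-- def get_neighbour(population_size):
--     num = population_size // 10
--     neighbours = [[0 for _ in range(num)] for _ in range(population_size)]
--     for i in range(population_size):
--         neighbours[i][0] = i  # The neighbour contains itself
--         count = 1
--         dis = 1
--         while count < num:
--             if count < num and (i - dis) >= 0:
--                 neighbours[i][count] = i - dis
--                 count += 1
--             if count < num and (i + dis) < population_size:
--                 neighbours[i][count] = i + dis
--                 count += 1
--             dis += 1
--     return neighbours
-- ===== SOURCE B (Python) =====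
-- def get_neighbour(population_size):
--     num = population_size // 10
--     neighbours = []
--     for i in range(population_size):
--         # every one of the num-1 nearest other indices lies within distance num-1 of i
--         lo = max(i - (num - 1), 0)
--         hi = min(i + num, population_size)
--         window = list(range(lo, i)) + list(range(i + 1, hi))
--         # sorted() is stable, so equal distances keep index order (lower index first)
--         nearest = sorted(window, key=lambda j: abs(j - i))
--         neighbours.append([i] + nearest[:num - 1])
--     return neighbours
-- ===== Notes on version B (the rewrite author's own statement) =====
-- stated objective: alternative
-- what changed: Per row, A's preallocated zero matrix and imperative two-pointer outward-expansion while-loop are replaced by a stable sort (by distance abs(j-i), ties falling to the lower index by stability) of the window of candidate indices within distance num-1, followed by taking a prefix; rows are appended to a fresh list.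
import Mathlib
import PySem

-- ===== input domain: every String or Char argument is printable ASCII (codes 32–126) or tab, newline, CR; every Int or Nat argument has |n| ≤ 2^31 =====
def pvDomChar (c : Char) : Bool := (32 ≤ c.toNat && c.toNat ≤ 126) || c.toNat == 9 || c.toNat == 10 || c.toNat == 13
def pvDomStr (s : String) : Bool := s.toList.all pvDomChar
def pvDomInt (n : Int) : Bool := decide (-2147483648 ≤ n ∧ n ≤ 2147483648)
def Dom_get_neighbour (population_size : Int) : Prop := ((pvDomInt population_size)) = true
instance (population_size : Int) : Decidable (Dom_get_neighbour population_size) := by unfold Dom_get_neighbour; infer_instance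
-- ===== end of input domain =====

-- B replaces A's two-pointer outward-expansion while-loop by a stable sort of the bounded candidate window by distance plus a prefix slice (alternative algorithm, same result).

-- ===== PORT A =====
-- the while-loop of A: state (row, count, dis); fuel only makes the recursion total
-- (under Pre_ the loop always makes progress, so `num.toNat + 1` steps are never exhausted — proved below)
def pvWhileA (p i num : Int) : Nat → List Int → Int → Int → List Int
  | 0, row, _, _ => row
  | fuel+1, row, count, dis =>
    if count < num then
      let s1 : List Int × Int :=
        if count < num ∧ 0 ≤ i - dis then (row.set count.toNat (i - dis), count + 1) else (row, count)
      let s2 : List Int × Int :=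
        if s1.2 < num ∧ i + dis < p then (s1.1.set s1.2.toNat (i + dis), s1.2 + 1) else s1
      pvWhileA p i num fuel s2.1 s2.2 (dis + 1)
    else row

-- neighbours[i][0] = i on the empty row (num = 0) is Python's IndexError: those inputs are outside Pre_
def get_neighbour (population_size : Int) : List (List Int) :=
  let num := PySem.Int.floordiv population_size 10
  (PySem.List.pyRange 0 population_size 1).foldl
    (fun m i =>
      m.set i.toNat
        (pvWhileA population_size i num (num.toNat + 1)
          (((PySem.List.pyGet? m i).getD []).set 0 i) 1 1))
    ((PySem.List.pyRange 0 population_size 1).map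
      (fun _ => (PySem.List.pyRange 0 num 1).map (fun _ => (0 : Int))))

-- ===== PORT B =====
def get_neighbour_alt (population_size : Int) : List (List Int) :=
  let num := PySem.Int.floordiv population_size 10
  (PySem.List.pyRange 0 population_size 1).foldl
    (fun res i =>
      let lo := max (i - (num - 1)) 0
      let hi := min (i + num) population_size
      let window := PySem.List.pyRange lo i 1 ++ PySem.List.pyRange (i + 1) hi 1
      let nearest := PySem.List.sorted window (fun j => |j - i|)
      res ++ [i :: PySem.List.slice nearest none (some (num - 1))]) []

-- ===== PRECONDITION & SPEC =====
-- Pre_ excludes exactly population_size ∈ 1..9, where A raises IndexError (num = 0 gives empty rows, A writes row[0])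
def Pre_get_neighbour (population_size : Int) : Prop :=
  population_size ≤ 0 ∨ 10 ≤ population_size
instance (population_size : Int) : Decidable (Pre_get_neighbour population_size) := by
  unfold Pre_get_neighbour; infer_instance
def pvWitness_get_neighbour : Int := (20)

def Spec_get_neighbour (population_size : Int) (out : List (List Int)) : Prop := out = get_neighbour_alt population_size
instance (population_size : Int) (out : List (List Int)) : Decidable (Spec_get_neighbour population_size out) := by unfold Spec_get_neighbour; infer_instance

-- ===== CLAIM (what is proved, stated in full; the proofs are below) =====
def Claim_equal_get_neighbour : Prop := ∀ (population_size : Int), Dom_get_neighbour population_size → Pre_get_neighbour population_size → Spec_get_neighbour population_size (get_neighbour population_size)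

-- ===== LEMMAS AND PROOFS =====

-- the sequence of neighbour candidates A scans, distances `dis ≤ d < dmax` outward
def pvL (p i dis dmax : Int) : List Int :=
  (PySem.List.pyRange dis dmax 1).flatMap
    (fun d => (if 0 ≤ i - d then [i - d] else []) ++ (if i + d < p then [i + d] else []))

-- sequential overwrite starting at position c (what A's writes amount to)
def pvFill (row : List Int) (c : Int) : List Int → List Int
  | [] => row
  | v :: t => pvFill (row.set c.toNat v) (c + 1) t

-- injective strict version of the sort key (distance first, left before right)
def pvK (i j : Int) : Int := 2 * |j - i| + (if i < j then 1 else 0)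

lemma pvL_nil (p i dis dmax : Int) (h1 : i - dis < 0) (h2 : p ≤ i + dis) : pvL p i dis dmax = [] := by
  unfold pvL
  rw [List.flatMap_eq_nil_iff]
  intro d hd
  rw [PySem.List.mem_pyRange_one] at hd
  have e2 : ¬ i + d < p := by omega
  simp [e2]
  omega

lemma pvL_nil' (p i dis dmax : Int) (h : dmax ≤ dis) : pvL p i dis dmax = [] := by
  unfold pvL
  rw [PySem.List.pyRange_one_eq_nil h]
  rfl

lemma pvL_cons (p i dis dmax : Int) (h : dis < dmax) :
    pvL p i dis dmax = ((if 0 ≤ i - dis then [i - dis] else []) ++ (if i + dis < p then [i + dis] else []))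
      ++ pvL p i (dis + 1) dmax := by
  unfold pvL
  rw [PySem.List.pyRange_one_cons h, List.flatMap_cons]

lemma pvK_left (i d : Int) (hd : 1 ≤ d) : pvK i (i - d) = 2 * d := by
  unfold pvK
  have e : |i - d - i| = d := by
    rw [show i - d - i = -d by ring, abs_neg, abs_of_nonneg (by omega)]
  rw [e, if_neg (by omega)]
  ring

lemma pvK_right (i d : Int) (hd : 1 ≤ d) : pvK i (i + d) = 2 * d + 1 := by
  unfold pvK
  have e : |i + d - i| = d := by
    rw [show i + d - i = d by ring, abs_of_nonneg (by omega)]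
  rw [e, if_pos (by omega)]

lemma pvWhileA_eq (p i num : Int) :
    ∀ (fuel : Nat) (row : List Int) (count dis : Int), 1 ≤ count → count ≤ num → 1 ≤ dis →
    (num - count).toNat ≤ fuel → (num - count).toNat ≤ (pvL p i dis p).length →
    pvWhileA p i num fuel row count dis = pvFill row count ((pvL p i dis p).take (num - count).toNat) := by
  intro fuel
  induction fuel with
  | zero =>
    intro row count dis h1 h2 h3 hf hl
    have hz : (num - count).toNat = 0 := by omega
    rw [hz]
    simp [pvWhileA, pvFill]
  | succ fuel ih =>
    intro row count dis h1 h2 h3 hf hl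
    by_cases hc : count < num
    · have hpos : 1 ≤ (num - count).toNat := by omega
      have hdp : dis < p := by
        by_contra hdp
        rw [pvL_nil' p i dis p (by omega)] at hl
        simp at hl; omega
      by_cases hA : 0 ≤ i - dis <;> by_cases hB : i + dis < p
      · -- both neighbours exist at this distance
        rw [pvL_cons p i dis p hdp, if_pos hA, if_pos hB] at hl ⊢
        simp only [List.length_append, List.cons_append, List.nil_append, List.length_cons] at hl
        by_cases hc2 : count + 1 < num
        · have e : (num - count).toNat = ((num - (count + 1 + 1)).toNat) + 1 + 1 := by omega
          rw [e]
          simp only [List.cons_append, List.nil_append, List.take_succ_cons]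
          simp only [pvWhileA, hc, hA, hB, hc2, and_self, if_true, if_pos, true_and, and_true,
            if_pos (And.intro hc hA), if_pos (And.intro hc2 hB)]
          rw [ih _ (count + 1 + 1) (dis + 1) (by omega) (by omega) (by omega) (by omega)
            (by simp at hl ⊢; omega)]
          simp [pvFill]
        · have hce : count + 1 = num := by omega
          have e : (num - count).toNat = 1 := by omega
          rw [e]
          simp only [List.cons_append, List.nil_append, List.take_succ_cons, List.take_zero]
          simp only [pvWhileA, hc, hA, hB, hc2, and_self, if_true, true_and, and_true,
            false_and, and_false, if_false, if_pos (And.intro hc hA)]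
          rw [ih _ (count + 1) (dis + 1) (by omega) (by omega) (by omega) (by omega) (by omega)]
          have hz : (num - (count + 1)).toNat = 0 := by omega
          rw [hz]
          simp [pvFill]
      · -- only the left neighbour
        rw [pvL_cons p i dis p hdp, if_pos hA, if_neg hB] at hl ⊢
        simp only [List.length_append, List.cons_append, List.nil_append, List.append_nil,
          List.length_cons] at hl
        have e : (num - count).toNat = ((num - (count + 1)).toNat) + 1 := by omega
        rw [e]
        simp only [List.cons_append, List.nil_append, List.append_nil, List.take_succ_cons]
        simp only [pvWhileA, hc, hA, hB, and_self, if_true, true_and, and_true, and_false, if_false,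
          if_pos (And.intro hc hA)]
        rw [ih _ (count + 1) (dis + 1) (by omega) (by omega) (by omega) (by omega)
          (by simp at hl ⊢; omega)]
        simp [pvFill]
      · -- only the right neighbour
        rw [pvL_cons p i dis p hdp, if_neg hA, if_pos hB] at hl ⊢
        simp only [List.length_append, List.cons_append, List.nil_append, List.length_cons] at hl
        have e : (num - count).toNat = ((num - (count + 1)).toNat) + 1 := by omega
        rw [e]
        simp only [List.nil_append, List.take_succ_cons]
        simp only [pvWhileA, hc, hA, hB, and_self, if_true, true_and, and_true, false_and, if_false,
          if_pos (And.intro hc hB)]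
        rw [ih _ (count + 1) (dis + 1) (by omega) (by omega) (by omega) (by omega)
          (by simp at hl ⊢; omega)]
        simp [pvFill]
      · -- no candidates left at all: contradicts the remaining-length hypothesis
        rw [pvL_nil p i dis p (by omega) (by omega)] at hl
        simp at hl; omega
    · have hz : (num - count).toNat = 0 := by omega
      rw [hz]
      simp [pvWhileA, hc, pvFill]

lemma pvFill_append : ∀ (vs pref : List Int) (c : Int) (k : Nat),
    c = pref.length → vs.length = k →
    pvFill (pref ++ List.replicate k (0 : Int)) c vs = pref ++ vs := by
  intro vs
  induction vs with
  | nil =>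
    intro pref c k hc hk
    simp at hk
    subst hk
    simp [pvFill]
  | cons v t ih =>
    intro pref c k hc hk
    obtain ⟨m, hm⟩ : ∃ m, k = m + 1 := ⟨t.length, by simpa using hk.symm⟩
    subst hm
    show pvFill ((pref ++ List.replicate (m + 1) (0 : Int)).set c.toNat v) (c + 1) t = pref ++ v :: t
    have hct : c.toNat = pref.length := by omega
    have hset : (pref ++ List.replicate (m + 1) (0 : Int)).set c.toNat v
        = (pref ++ [v]) ++ List.replicate m (0 : Int) := by
      rw [hct, List.set_append, if_neg (by omega)]
      simp [List.replicate_succ]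
    rw [hset]
    have := ih (pref ++ [v]) (c + 1) m (by simp; omega) (by simpa using hk)
    rw [this]
    simp

lemma mem_pvL (p i : Int) (hi0 : 0 ≤ i) (hip : i < p) (x : Int) :
    x ∈ pvL p i 1 p ↔ 0 ≤ x ∧ x < p ∧ x ≠ i := by
  unfold pvL
  rw [List.mem_flatMap]
  constructor
  · rintro ⟨d, hd, hx⟩
    rw [PySem.List.mem_pyRange_one] at hd
    rcases List.mem_append.1 hx with h | h <;> split_ifs at h <;> simp at h <;> omega
  · rintro ⟨hx0, hxp, hxi⟩
    rcases lt_or_gt_of_ne hxi with h | h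
    · refine ⟨i - x, ?_, ?_⟩
      · rw [PySem.List.mem_pyRange_one]; omega
      · rw [List.mem_append]; left
        rw [if_pos (by omega)]
        simp only [List.mem_singleton]; omega
    · refine ⟨x - i, ?_, ?_⟩
      · rw [PySem.List.mem_pyRange_one]; omega
      · rw [List.mem_append]; right
        rw [if_pos (by omega)]
        simp only [List.mem_singleton]; omega

lemma pvK_lower (p i dis dmax x : Int) (hdis : 1 ≤ dis) (hx : x ∈ pvL p i dis dmax) : 2 * dis ≤ pvK i x := by
  unfold pvL at hx
  rw [List.mem_flatMap] at hx
  obtain ⟨d, hd, hx⟩ := hx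
  rw [PySem.List.mem_pyRange_one] at hd
  rcases List.mem_append.1 hx with h | h <;> split_ifs at h <;> simp at h
  · rw [h, pvK_left i d (by omega)]; omega
  · rw [h, pvK_right i d (by omega)]; omega

lemma pvL_pairwise (p i dmax : Int) : ∀ (n : Nat) (dis : Int), 1 ≤ dis → (dmax - dis).toNat ≤ n →
    (pvL p i dis dmax).Pairwise (fun a b => pvK i a < pvK i b) := by
  intro n
  induction n with
  | zero =>
    intro dis h1 h2
    rw [pvL_nil' p i dis dmax (by omega)]
    exact List.Pairwise.nil
  | succ n ih =>
    intro dis h1 h2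
    by_cases hdp : dis < dmax
    · rw [pvL_cons p i dis dmax hdp]
      have hcand : ∀ u ∈ ((if 0 ≤ i - dis then [i - dis] else []) ++ (if i + dis < p then [i + dis] else [])),
          pvK i u ≤ 2 * dis + 1 := by
        intro u hu
        rcases List.mem_append.1 hu with h | h <;> split_ifs at h <;> simp at h
        · rw [h, pvK_left i dis (by omega)]; omega
        · rw [h, pvK_right i dis (by omega)]
      rw [List.pairwise_append]
      refine ⟨?_, ih (dis + 1) (by omega) (by omega), ?_⟩
      · have hkl := pvK_left i dis (by omega : (1:Int) ≤ dis)
        have hkr := pvK_right i dis (by omega : (1:Int) ≤ dis)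
        split_ifs with hl hr hr <;> simp [List.pairwise_cons] <;> omega
      · intro u hu v hv
        have h1' := hcand u hu
        have h2' := pvK_lower p i (dis + 1) dmax v (by omega) hv
        omega
    · rw [pvL_nil' p i dis dmax (by omega)]
      exact List.Pairwise.nil

lemma pvL_nodup (p i dmax : Int) : (pvL p i 1 dmax).Nodup := by
  have h := pvL_pairwise p i dmax (dmax - 1).toNat 1 (by omega) (by omega)
  exact h.imp (fun {a b} hab => by intro he; rw [he] at hab; exact lt_irrefl _ hab)

lemma mem_others (p i x : Int) :
    x ∈ (PySem.List.pyRange 0 p 1).filter (fun j => j != i) ↔ 0 ≤ x ∧ x < p ∧ x ≠ i := by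
  simp [List.mem_filter, PySem.List.mem_pyRange_one]
  tauto

lemma pvL_perm_others (p i : Int) (hi0 : 0 ≤ i) (hip : i < p) :
    (pvL p i 1 p).Perm ((PySem.List.pyRange 0 p 1).filter (fun j => j != i)) := by
  rw [List.perm_ext_iff_of_nodup (pvL_nodup p i p)
    (List.Nodup.filter _ (PySem.List.nodup_pyRange_one 0 p))]
  intro x
  rw [mem_pvL p i hi0 hip x, mem_others p i x]

lemma insertBy_congr (c1 c2 : Int → Int → Bool) (x : Int) : ∀ (acc : List Int),
    (∀ y ∈ acc, c1 x y = c2 x y) →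
    PySem.List.insertBy c1 x acc = PySem.List.insertBy c2 x acc := by
  intro acc
  induction acc with
  | nil => intro _; rfl
  | cons y ys ih =>
    intro h
    show PySem.List.insertBy c1 x (y :: ys) = PySem.List.insertBy c2 x (y :: ys)
    have hy : c1 x y = c2 x y := h y (by simp)
    simp only [PySem.List.insertBy]
    rw [hy, ih (fun z hz => h z (by simp [hz]))]

lemma foldl_insertBy_congr (c1 c2 : Int → Int → Bool) : ∀ (xs acc : List Int),
    (∀ x ∈ xs, ∀ y ∈ acc, c1 x y = c2 x y) →
    List.Pairwise (fun b a => c1 a b = c2 a b) xs →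
    xs.foldl (fun acc x => PySem.List.insertBy c1 x acc) acc
      = xs.foldl (fun acc x => PySem.List.insertBy c2 x acc) acc := by
  intro xs
  induction xs with
  | nil => intro acc _ _; rfl
  | cons x t ih =>
    intro acc hacc hpw
    rw [List.pairwise_cons] at hpw
    simp only [List.foldl_cons]
    rw [insertBy_congr c1 c2 x acc (hacc x (by simp))]
    apply ih
    · intro z hz y hy
      rcases (PySem.List.mem_insertBy _ _ _ _).1 hy with h | h
      · rw [h]; exact hpw.1 z hz
      · exact hacc z (by simp [hz]) y h
    · exact hpw.2

lemma mem_pvW (p i num x : Int) (hi0 : 0 ≤ i) (hip : i < p) :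
    x ∈ pvL p i 1 num ↔ 0 ≤ x ∧ x < p ∧ x ≠ i ∧ i - (num - 1) ≤ x ∧ x ≤ i + (num - 1) := by
  unfold pvL
  rw [List.mem_flatMap]
  constructor
  · rintro ⟨d, hd, hx⟩
    rw [PySem.List.mem_pyRange_one] at hd
    rcases List.mem_append.1 hx with h | h <;> split_ifs at h <;> simp at h <;> omega
  · rintro ⟨hx0, hxp, hxi, hxl, hxr⟩
    rcases lt_or_gt_of_ne hxi with h | h
    · refine ⟨i - x, ?_, ?_⟩
      · rw [PySem.List.mem_pyRange_one]; omega
      · rw [List.mem_append]; left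
        rw [if_pos (by omega)]
        simp only [List.mem_singleton]; omega
    · refine ⟨x - i, ?_, ?_⟩
      · rw [PySem.List.mem_pyRange_one]; omega
      · rw [List.mem_append]; right
        rw [if_pos (by omega)]
        simp only [List.mem_singleton]; omega

lemma mem_window (p i num x : Int) :
    x ∈ PySem.List.pyRange (max (i - (num - 1)) 0) i 1 ++ PySem.List.pyRange (i + 1) (min (i + num) p) 1
      ↔ (max (i - (num - 1)) 0 ≤ x ∧ x < i) ∨ (i + 1 ≤ x ∧ x < min (i + num) p) := by
  rw [List.mem_append, PySem.List.mem_pyRange_one, PySem.List.mem_pyRange_one]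

lemma window_pairwise (p i num : Int) :
    (PySem.List.pyRange (max (i - (num - 1)) 0) i 1
      ++ PySem.List.pyRange (i + 1) (min (i + num) p) 1).Pairwise (· < ·) := by
  rw [List.pairwise_append]
  refine ⟨PySem.List.pairwise_lt_pyRange_one _ _, PySem.List.pairwise_lt_pyRange_one _ _, ?_⟩
  intro a ha b hb
  rw [PySem.List.mem_pyRange_one] at ha hb
  omega

lemma pvW_perm_window (p i num : Int) (hi0 : 0 ≤ i) (hip : i < p) :
    (pvL p i 1 num).Perm
      (PySem.List.pyRange (max (i - (num - 1)) 0) i 1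
        ++ PySem.List.pyRange (i + 1) (min (i + num) p) 1) := by
  rw [List.perm_ext_iff_of_nodup (pvL_nodup p i num)
    ((window_pairwise p i num).imp (fun {a b} hab => by omega))]
  intro x
  rw [mem_pvW p i num x hi0 hip, mem_window]
  omega

lemma sorted_abs_eq_pvW (p i num : Int) (hi0 : 0 ≤ i) (hip : i < p) :
    PySem.List.sorted
      (PySem.List.pyRange (max (i - (num - 1)) 0) i 1
        ++ PySem.List.pyRange (i + 1) (min (i + num) p) 1)
      (fun j => |j - i|) = pvL p i 1 num := by
  have hK : PySem.List.sorted
      (PySem.List.pyRange (max (i - (num - 1)) 0) i 1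
        ++ PySem.List.pyRange (i + 1) (min (i + num) p) 1)
      (fun j => pvK i j) = pvL p i 1 num :=
    PySem.List.sorted_eq_of_perm_of_pairwise_lt _ _ _ (pvW_perm_window p i num hi0 hip)
      (pvL_pairwise p i num (num - 1).toNat 1 (by omega) (by omega))
  rw [← hK, PySem.List.sorted_eq_foldl_insertBy, PySem.List.sorted_eq_foldl_insertBy]
  apply foldl_insertBy_congr
  · intro x _ y hy
    simp at hy
  · refine (window_pairwise p i num).imp_of_mem (fun {b a} hb ha hba => ?_)
    have hbi : b ≠ i := by rw [mem_window] at hb; omega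
    have hai : a ≠ i := by rw [mem_window] at ha; omega
    rw [decide_eq_decide]
    unfold pvK
    rcases abs_cases (a - i) with ⟨ea, ha'⟩ | ⟨ea, ha'⟩ <;>
      rcases abs_cases (b - i) with ⟨eb, hb'⟩ | ⟨eb, hb'⟩ <;>
        rw [ea, eb] <;> split_ifs <;> omega

lemma take_pvL_eq (p i num : Int) (hi0 : 0 ≤ i) (hip : i < p) (hn1 : 1 ≤ num) (hn2 : num ≤ p) :
    (pvL p i 1 p).take (num - 1).toNat = (pvL p i 1 num).take (num - 1).toNat := by
  have hsplit : pvL p i 1 p = pvL p i 1 num ++ (PySem.List.pyRange num p 1).flatMap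
      (fun d => (if 0 ≤ i - d then [i - d] else []) ++ (if i + d < p then [i + d] else [])) := by
    unfold pvL
    rw [PySem.List.pyRange_one_append 1 num p (by omega) (by omega), List.flatMap_append]
  have hlen : (num - 1).toNat ≤ (pvL p i 1 num).length := by
    rw [(pvW_perm_window p i num hi0 hip).length_eq, List.length_append,
      PySem.List.length_pyRange_one, PySem.List.length_pyRange_one]
    omega
  rw [hsplit, List.take_append_of_le_length hlen]

lemma others_len (p i : Int) (hi0 : 0 ≤ i) (hip : i < p) :
    ((PySem.List.pyRange 0 p 1).filter (fun j => j != i)).length = (p - 1).toNat := by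
  rw [PySem.List.pyRange_one_append 0 i p hi0 (le_of_lt hip), PySem.List.pyRange_one_cons hip]
  rw [List.filter_append, List.filter_cons]
  rw [if_neg (by simp)]
  rw [List.filter_eq_self.2 (fun j hj => by
    rw [PySem.List.mem_pyRange_one] at hj; simp; omega)]
  rw [List.filter_eq_self.2 (fun j hj => by
    rw [PySem.List.mem_pyRange_one] at hj; simp; omega)]
  rw [List.length_append, PySem.List.length_pyRange_one, PySem.List.length_pyRange_one]
  omega

lemma pvL_len (p i : Int) (hi0 : 0 ≤ i) (hip : i < p) :
    (pvL p i 1 p).length = (p - 1).toNat := by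
  rw [(pvL_perm_others p i hi0 hip).length_eq, others_len p i hi0 hip]

lemma pvRow_eq (p i num : Int) (hnum1 : 1 ≤ num) (hnum2 : num ≤ p - 2)
    (hi0 : 0 ≤ i) (hip : i < p) :
    pvWhileA p i num (num.toNat + 1)
      ((((PySem.List.pyRange 0 num 1).map (fun _ => (0 : Int))).set 0 i)) 1 1
      = i :: (pvL p i 1 p).take (num - 1).toNat := by
  have hlen : (pvL p i 1 p).length = (p - 1).toNat := pvL_len p i hi0 hip
  have hrow0 : (((PySem.List.pyRange 0 num 1).map (fun _ => (0 : Int))).set 0 i)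
      = [i] ++ List.replicate (num.toNat - 1) (0 : Int) := by
    rw [List.map_const', PySem.List.length_pyRange_one]
    obtain ⟨m, hm⟩ : ∃ m, (num - 0).toNat = m + 1 := ⟨(num - 0).toNat - 1, by omega⟩
    rw [hm, List.replicate_succ]
    simp
    omega
  rw [hrow0]
  rw [pvWhileA_eq p i num (num.toNat + 1) _ 1 1 (by omega) (by omega) (by omega)
    (by omega) (by omega)]
  rw [pvFill_append _ [i] 1 (num.toNat - 1) (by simp) (by
    rw [List.length_take]; omega)]
  simp

lemma pyGet?_map_range (h : Int → List Int) (p k : Int) (h0 : 0 ≤ k) (hk : k < p) :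
    PySem.List.pyGet? ((PySem.List.pyRange 0 p 1).map h) k = some (h k) := by
  have e1 : k = ((k.toNat : Nat) : Int) := by omega
  have e2 : p = ((p.toNat : Nat) : Int) := by omega
  rw [e1, PySem.List.pyGet?_natCast, e2,
    PySem.List.getElem?_map_pyRange_zero h p.toNat k.toNat (by omega)]

lemma set_map_range (p k : Int) (h : Int → List Int) (v : List Int) (h0 : 0 ≤ k) (hk : k < p) :
    ((PySem.List.pyRange 0 p 1).map h).set k.toNat v
      = (PySem.List.pyRange 0 p 1).map (fun j => if j = k then v else h j) := by
  apply List.ext_getElem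
  · simp
  intro n h1 h2
  simp only [List.getElem_set, List.getElem_map]
  have hn : n < (PySem.List.pyRange 0 p 1).length := by simpa using h2
  have he : (PySem.List.pyRange 0 p 1)[n] = (n : Int) := by
    rw [PySem.List.getElem_pyRange_one]; omega
  rw [he]
  split_ifs with hA hB hB
  · rfl
  · exfalso; omega
  · exfalso; omega
  · rfl

lemma pvFoldA (p num : Int) (R : Int → List Int) (Z : List Int)
    (hR : ∀ i, 0 ≤ i → i < p →
      pvWhileA p i num (num.toNat + 1) (Z.set 0 i) 1 1 = R i) :
    ∀ (n : Nat) (k : Int), 0 ≤ k → (p - k).toNat ≤ n →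
    (PySem.List.pyRange k p 1).foldl
      (fun m i => m.set i.toNat
        (pvWhileA p i num (num.toNat + 1) (((PySem.List.pyGet? m i).getD []).set 0 i) 1 1))
      ((PySem.List.pyRange 0 p 1).map (fun j => if j < k then R j else Z))
    = (PySem.List.pyRange 0 p 1).map R := by
  intro n
  induction n with
  | zero =>
    intro k h0 hk
    rw [PySem.List.pyRange_one_eq_nil (show p ≤ k by omega)]
    simp only [List.foldl_nil]
    apply List.map_congr_left
    intro j hj
    rw [PySem.List.mem_pyRange_one] at hj
    rw [if_pos (by omega)]
  | succ n ih =>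
    intro k h0 hk
    by_cases hkp : k < p
    · rw [PySem.List.pyRange_one_cons hkp, List.foldl_cons]
      rw [pyGet?_map_range (fun j => if j < k then R j else Z) p k h0 hkp]
      rw [Option.getD_some, if_neg (lt_irrefl k), hR k h0 hkp]
      have hstep : ((PySem.List.pyRange 0 p 1).map (fun j => if j < k then R j else Z)).set k.toNat (R k)
          = (PySem.List.pyRange 0 p 1).map (fun j => if j < k + 1 then R j else Z) := by
        rw [set_map_range p k _ (R k) h0 hkp]
        apply List.map_congr_left
        intro j hj
        by_cases hjk : j = k
        · subst hjk; rw [if_pos rfl, if_pos (by omega)]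
        · rw [if_neg hjk]
          by_cases hlt : j < k
          · rw [if_pos hlt, if_pos (by omega)]
          · rw [if_neg hlt, if_neg (by omega)]
      rw [hstep]
      exact ih (k + 1) (by omega) (by omega)
    · rw [PySem.List.pyRange_one_eq_nil (show p ≤ k by omega)]
      simp only [List.foldl_nil]
      apply List.map_congr_left
      intro j hj
      rw [PySem.List.mem_pyRange_one] at hj
      rw [if_pos (by omega)]

lemma alt_eq_map (p : Int) :
    get_neighbour_alt p = (PySem.List.pyRange 0 p 1).map (fun i =>
      i :: PySem.List.slice
        (PySem.List.sorted
          (PySem.List.pyRange (max (i - (PySem.Int.floordiv p 10 - 1)) 0) i 1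
            ++ PySem.List.pyRange (i + 1) (min (i + PySem.Int.floordiv p 10) p) 1)
          (fun j => |j - i|))
        none (some (PySem.Int.floordiv p 10 - 1))) := by
  unfold get_neighbour_alt
  rw [PySem.List.foldl_append_eq_flatMap]
  rw [List.nil_append]
  exact (List.map_eq_flatMap).symm

theorem get_neighbour_spec : Claim_equal_get_neighbour := by
  unfold Claim_equal_get_neighbour
  intro p _ hpre
  unfold Spec_get_neighbour
  rcases hpre with hp | hp
  · unfold get_neighbour get_neighbour_alt
    rw [PySem.List.pyRange_one_eq_nil hp]
    simp
  · have hnum : 1 ≤ PySem.Int.floordiv p 10 ∧ PySem.Int.floordiv p 10 ≤ p - 2 := by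
      unfold PySem.Int.floordiv
      rw [Int.fdiv_eq_ediv]
      simp
      omega
    have hA : get_neighbour p = (PySem.List.pyRange 0 p 1).map
        (fun i => i :: (pvL p i 1 p).take (PySem.Int.floordiv p 10 - 1).toNat) := by
      show (PySem.List.pyRange 0 p 1).foldl
          (fun m i => m.set i.toNat
            (pvWhileA p i (PySem.Int.floordiv p 10) ((PySem.Int.floordiv p 10).toNat + 1)
              (((PySem.List.pyGet? m i).getD []).set 0 i) 1 1))
          ((PySem.List.pyRange 0 p 1).map
            (fun _ => (PySem.List.pyRange 0 (PySem.Int.floordiv p 10) 1).map (fun _ => (0 : Int))))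
        = _
      have hinit : ((PySem.List.pyRange 0 p 1).map
            (fun _ => (PySem.List.pyRange 0 (PySem.Int.floordiv p 10) 1).map (fun _ => (0 : Int))))
          = (PySem.List.pyRange 0 p 1).map (fun j => if j < 0
              then (fun i => i :: (pvL p i 1 p).take (PySem.Int.floordiv p 10 - 1).toNat) j
              else (PySem.List.pyRange 0 (PySem.Int.floordiv p 10) 1).map (fun _ => (0 : Int))) := by
        apply List.map_congr_left
        intro j hj
        rw [PySem.List.mem_pyRange_one] at hj
        rw [if_neg (by omega)]
      rw [hinit]
      exact pvFoldA p (PySem.Int.floordiv p 10) _ _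
        (fun i hi0 hip => pvRow_eq p i (PySem.Int.floordiv p 10) hnum.1 hnum.2 hi0 hip)
        p.toNat 0 (by omega) (by omega)
    rw [hA, alt_eq_map]
    apply List.map_congr_left
    intro i hi
    rw [PySem.List.mem_pyRange_one] at hi
    rw [sorted_abs_eq_pvW p i (PySem.Int.floordiv p 10) hi.1 hi.2,
      PySem.List.slice_to _ (by omega),
      take_pvL_eq p i (PySem.Int.floordiv p 10) hi.1 hi.2 (by omega) (by omega)]
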